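-- pv_equiv track=rewrite | github.com/eroge-69/PyToExe | python-files/JBD_Exp.py | get_first_two_sentences
-- ===== SOURCE A (Python) =====
-- def get_first_two_sentences(text: str) -> str:
--     """Извлечение первых двух предложений"""
--     if not text:
--         return ""
--
--     sentences = []
--     sentence_start = 0
--
--     for i, char in enumerate(text):
--         if char in '.!?':
--             # Проверяем, что это действительно конец предложения
--             if i == len(text) - 1 or text[i+1] in ' \t\n\r':
--                 sentences.append(text[sentence_start:i+1].strip())
--                 sentence_start = i + 1
--                 if len(sentences) == 2:
--                     break
--
--     # Если нашли меньше двух предложений, добавляем остаток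
--     if len(sentences) < 2 and sentence_start < len(text):
--         remaining = text[sentence_start:].strip()
--         if remaining:
--             sentences.append(remaining)
--
--     return ' '.join(sentences)
-- ===== SOURCE B (Python) =====
-- def get_first_two_sentences(text: str) -> str:
--     """Lexer reformulation: split the text into maximal non-whitespace token
--     spans first; a sentence ends exactly at a token whose last character is
--     '.', '!' or '?'. Sentences are sliced from the first token of a group to
--     the end of its boundary token, so no strip() is ever needed."""
--     if not text:
--         return ""
--     n = len(text)
--     # stage 1: lex the maximal non-whitespace runs as (start, end) spans
--     spans = []
--     i = 0
--     while i < n: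
--         if text[i] in ' \t\n\r':
--             i += 1
--         else:
--             j = i
--             while j < n and text[j] not in ' \t\n\r':
--                 j += 1
--             spans.append((i, j))
--             i = j
--     # stage 2: group tokens into sentences at boundary tokens
--     sentences = []
--     group_start = None
--     for a, b in spans:
--         if group_start is None:
--             group_start = a
--         if text[b - 1] in '.!?':
--             sentences.append(text[group_start:b])
--             group_start = None
--             if len(sentences) == 2:
--                 break
--     if len(sentences) < 2 and group_start is not None:
--         sentences.append(text[group_start:spans[-1][1]])
--     return ' '.join(sentences)
-- ===== Notes on version B (the rewrite author's own statement) =====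
-- stated objective: alternative
-- what changed: Replaces A's per-character scan (testing each char against '.!?' and peeking at the next char, then strip()-ing slices) by a two-stage lexer: first tokenize the text into maximal non-whitespace spans, then group tokens into sentences -- a sentence ends exactly at a token whose last character is '.', '!' or '?' -- slicing from the group's first token so strip() disappears entirely.
import Mathlib
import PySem

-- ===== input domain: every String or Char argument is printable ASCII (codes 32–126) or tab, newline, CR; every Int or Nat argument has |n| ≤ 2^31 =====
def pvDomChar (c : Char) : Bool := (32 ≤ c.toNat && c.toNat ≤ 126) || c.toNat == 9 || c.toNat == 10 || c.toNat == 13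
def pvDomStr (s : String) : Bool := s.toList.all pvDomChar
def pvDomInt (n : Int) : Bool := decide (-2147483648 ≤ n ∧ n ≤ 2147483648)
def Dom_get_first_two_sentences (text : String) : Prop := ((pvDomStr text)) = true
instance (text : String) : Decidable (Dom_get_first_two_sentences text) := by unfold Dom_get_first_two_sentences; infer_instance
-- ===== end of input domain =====

-- B replaces A's per-character boundary scan + strip() by a two-stage lexer: tokenize into
-- maximal non-whitespace spans, then group tokens into sentences at tokens ending in '.!?'
-- ('alternative'; same O(n) cost).

-- ===== PORT A =====
def pvEndPunct (c : Char) : Bool := c == '.' || c == '!' || c == '?'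
def pvWsChar (c : Char) : Bool := c == ' ' || c == '\t' || c == '\n' || c == '\r'

-- A's for-loop over enumerate(text), with the break modelled as an early return
def pvLoopA (t : List Char) : List Nat → Nat → List (List Char) → (List (List Char) × Nat)
  | [], start, sents => (sents, start)
  | i :: is, start, sents =>
    if pvEndPunct (t.getD i ' ') then
      if i == t.length - 1 || pvWsChar (t.getD (i + 1) ' ') then
        let sents' := sents ++ [PySem.Chars.strip (PySem.List.slice t (some (start : Int)) (some ((i + 1 : Nat) : Int)))]
        if sents'.length == 2 then (sents', i + 1)
        else pvLoopA t is (i + 1) sents'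
      else pvLoopA t is start sents
    else pvLoopA t is start sents

def get_first_two_sentences (text : String) : String :=
  let t := text.toList
  if t.length == 0 then ""
  else
    let r := pvLoopA t (List.range t.length) 0 []
    let sents := r.1
    let start := r.2
    let sents :=
      if sents.length < 2 ∧ start < t.length then
        let remaining := PySem.Chars.strip (PySem.List.slice t (some (start : Int)) none)
        if remaining ≠ [] then sents ++ [remaining] else sents
      else sents
    String.ofList (PySem.Chars.join [' '] sents)

-- ===== PORT B =====
-- stage 1: the lexer (B's outer while loop); the inner while is the takeWhile run
def pvLex : List Char → Nat → List (Nat × Nat)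
  | [], _ => []
  | c :: cs, i =>
    if pvWsChar c then pvLex cs (i + 1)
    else
      let r := ((c :: cs).takeWhile (fun d => !pvWsChar d)).length
      (i, i + r) :: pvLex ((c :: cs).drop r) (i + r)
termination_by l _ => l.length
decreasing_by
  · simp
  · have hr : 0 < ((c :: cs).takeWhile (fun d => !pvWsChar d)).length := by
      simp [List.takeWhile]; simp_all
    simp only [List.length_drop, List.length_cons]
    omega

-- stage 2: group tokens into sentences (B's for-loop over spans, break as early return)
def pvGroup (t : List Char) : List (Nat × Nat) → Option Nat → List (List Char) → (List (List Char) × Option Nat)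
  | [], gs, sents => (sents, gs)
  | (a, b) :: rest, gs, sents =>
    let g := gs.getD a
    if pvEndPunct (t.getD (b - 1) ' ') then
      let sents' := sents ++ [PySem.List.slice t (some (g : Int)) (some (b : Int))]
      if sents'.length == 2 then (sents', none)
      else pvGroup t rest none sents'
    else pvGroup t rest (some g) sents

def get_first_two_sentences_alt (text : String) : String :=
  let t := text.toList
  if t.length == 0 then ""
  else
    let spans := pvLex t 0
    let r := pvGroup t spans none []
    let sents := r.1
    let sents :=
      if sents.length < 2 ∧ r.2.isSome then
        sents ++ [PySem.List.slice t (some ((r.2.getD 0 : Nat) : Int)) (some (((spans.getLastD (0, 0)).2 : Nat) : Int))]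
      else sents
    String.ofList (PySem.Chars.join [' '] sents)

-- ===== PRECONDITION & SPEC =====
def Spec_get_first_two_sentences (text : String) (out : String) : Prop := out = get_first_two_sentences_alt text
instance (text : String) (out : String) : Decidable (Spec_get_first_two_sentences text out) := by unfold Spec_get_first_two_sentences; infer_instance

-- ===== CLAIM (what is proved, stated in full; the proofs are below) =====
def Claim_equal_get_first_two_sentences : Prop := ∀ (text : String), Dom_get_first_two_sentences text → Spec_get_first_two_sentences text (get_first_two_sentences text)

-- ===== LEMMAS AND PROOFS =====

-- A's boundary test at index i
def pvIsEnd (t : List Char) (i : Nat) : Bool :=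
  pvEndPunct (t.getD i ' ') && (i == t.length - 1 || pvWsChar (t.getD (i + 1) ' '))

-- B's boundary test on a token span
def pvIsBnd (t : List Char) (p : Nat × Nat) : Bool := pvEndPunct (t.getD (p.2 - 1) ' ')

def sStrip (t : List Char) (a b : Nat) : List Char :=
  PySem.Chars.strip (PySem.List.slice t (some (a : Int)) (some ((b : Nat) : Int)))

def slc (t : List Char) (a b : Nat) : List Char :=
  PySem.List.slice t (some (a : Int)) (some ((b : Nat) : Int))

theorem loopA_one (t : List Char) (l : List Nat) :
    ∀ start x, pvLoopA t l start [x] =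
      match l.filter (pvIsEnd t) with
      | [] => ([x], start)
      | j :: _ => ([x, sStrip t start (j + 1)], j + 1) := by
  induction l with
  | nil => intro start x; simp [pvLoopA]
  | cons j js ih =>
    intro start x
    by_cases h1 : pvEndPunct (t[j]?.getD ' ') = true
    · by_cases h2 : (j = t.length - 1 ∨ pvWsChar (t[j + 1]?.getD ' ') = true)
      · simp [pvLoopA, pvIsEnd, h1, h2, sStrip]
      · simp [pvLoopA, pvIsEnd, h1, h2, ih]
    · simp [pvLoopA, pvIsEnd, h1, ih]

theorem loopA_zero (t : List Char) (l : List Nat) :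
    ∀ start, pvLoopA t l start [] =
      match l.filter (pvIsEnd t) with
      | [] => ([], start)
      | [j] => ([sStrip t start (j + 1)], j + 1)
      | j :: k :: _ => ([sStrip t start (j + 1), sStrip t (j + 1) (k + 1)], k + 1) := by
  induction l with
  | nil => intro start; simp [pvLoopA]
  | cons j js ih =>
    intro start
    by_cases h1 : pvEndPunct (t[j]?.getD ' ') = true
    · by_cases h2 : (j = t.length - 1 ∨ pvWsChar (t[j + 1]?.getD ' ') = true)
      · have h3 := loopA_one t js (j + 1) (sStrip t start (j + 1))
        rcases h : js.filter (pvIsEnd t) with _ | ⟨k, rest⟩ <;>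
          rw [h] at h3 <;> simp only [sStrip] at h3 <;> push_cast at h3 <;>
          simp [pvLoopA, pvIsEnd, h1, h2, sStrip, h, h3]
      · simp [pvLoopA, pvIsEnd, h1, h2, ih]
    · simp [pvLoopA, pvIsEnd, h1, ih]

-- Dom chars: Python str.strip whitespace coincides with the literal set ' \t\n\r'
theorem isspace_eq_ws (c : Char) (h : pvDomChar c = true) :
    PySem.Chars.isspace c = pvWsChar c := by
  have key : ∀ (d : Char), (c == d) = decide (c.toNat = d.toNat) := by
    intro d
    rcases Decidable.em (c = d) with h' | h'
    · simp [h']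
    · have hne : c.toNat ≠ d.toNat := by
        intro hh
        exact h' (Char.ext (by simpa [Char.toNat] using (UInt32.toNat_inj).mp hh))
      simp [h', hne]
  simp only [pvDomChar, Bool.or_eq_true, Bool.and_eq_true, decide_eq_true_eq, beq_iff_eq] at h
  rw [Bool.eq_iff_iff]
  simp only [PySem.Chars.isspace, pvWsChar, key, Bool.or_eq_true, Bool.and_eq_true,
    decide_eq_true_eq]
  have l1 : (' ' : Char).toNat = 32 := rfl
  have l2 : ('\t' : Char).toNat = 9 := rfl
  have l3 : ('\n' : Char).toNat = 10 := rfl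
  have l4 : ('\r' : Char).toNat = 13 := rfl
  rw [l1, l2, l3, l4]
  omega

theorem ws_not_punct (c : Char) (h : pvWsChar c = true) : pvEndPunct c = false := by
  simp only [pvWsChar, Bool.or_eq_true, beq_iff_eq] at h
  rcases h with ((rfl | rfl) | rfl) | rfl <;> decide

theorem takeWhile_pred (p : Char → Bool) (l : List Char) :
    ∀ k, k < (l.takeWhile p).length → p (l.getD k ' ') = true := by
  induction l with
  | nil => simp
  | cons c cs ih =>
    intro k hk
    by_cases hc : p c
    · cases k with
      | zero => simpa [List.getD]
      | succ k => simp [List.takeWhile, hc] at hk ⊢; exact ih k (by omega)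
    · simp [List.takeWhile, hc] at hk

theorem takeWhile_maximal (p : Char → Bool) (l : List Char) :
    (l.takeWhile p).length = l.length ∨ p (l.getD (l.takeWhile p).length ' ') = false := by
  induction l with
  | nil => simp
  | cons c cs ih =>
    by_cases hc : p c
    · rcases ih with h | h
      · left; simp [List.takeWhile, hc, h]
      · right; simpa [List.takeWhile, hc]
    · right; simpa [List.takeWhile, hc]

theorem drop_cons (t : List Char) (i : Nat) (h : i < t.length) :
    t.drop i = t.getD i ' ' :: t.drop (i + 1) := by
  rw [List.drop_eq_getElem_cons h, List.getD_eq_getElem t ' ' h]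

theorem getD_drop (t : List Char) (i j : Nat) :
    (t.drop i).getD j ' ' = t.getD (i + j) ' ' := by
  simp [List.getD_eq_getElem?_getD, List.getElem?_drop]

theorem pvLex_cons (c : Char) (cs : List Char) (i : Nat) :
    pvLex (c :: cs) i =
      if pvWsChar c then pvLex cs (i + 1)
      else (i, i + ((c :: cs).takeWhile (fun d => !pvWsChar d)).length) ::
        pvLex ((c :: cs).drop (((c :: cs).takeWhile (fun d => !pvWsChar d)).length))
          (i + ((c :: cs).takeWhile (fun d => !pvWsChar d)).length) := by
  rw [pvLex]

theorem lex_nil : ∀ m (t : List Char) i, t.length - i = m → pvLex (t.drop i) i = [] →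
    ∀ k, i ≤ k → k < t.length → pvWsChar (t.getD k ' ') = true := by
  intro m
  induction m with
  | zero => intro t i hm _ k hk1 hk2; omega
  | succ m ih =>
    intro t i hm hlex k hk1 hk2
    have hi : i < t.length := by omega
    rw [drop_cons t i hi, pvLex_cons] at hlex
    by_cases hw : pvWsChar (t.getD i ' ') = true
    · rw [if_pos hw] at hlex
      rcases Nat.eq_or_lt_of_le hk1 with rfl | hlt
      · exact hw
      · exact ih t (i + 1) (by omega) hlex k hlt hk2
    · rw [if_neg hw] at hlex
      simp at hlex

theorem lex_cons : ∀ m (t : List Char) i a b rest, t.length - i = m →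
    pvLex (t.drop i) i = (a, b) :: rest →
    i ≤ a ∧ a < b ∧ b ≤ t.length ∧
    (∀ k, i ≤ k → k < a → pvWsChar (t.getD k ' ') = true) ∧
    (∀ k, a ≤ k → k < b → pvWsChar (t.getD k ' ') = false) ∧
    (b = t.length ∨ pvWsChar (t.getD b ' ') = true) ∧
    rest = pvLex (t.drop b) b := by
  intro m
  induction m with
  | zero =>
    intro t i a b rest hm hlex
    have hnil : t.drop i = [] := List.drop_eq_nil_of_le (by omega)
    simp [hnil, pvLex] at hlex
  | succ m ih =>
    intro t i a b rest hm hlex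
    have hi : i < t.length := by omega
    have hdc := drop_cons t i hi
    rw [hdc, pvLex_cons] at hlex
    by_cases hw : pvWsChar (t.getD i ' ') = true
    · rw [if_pos hw] at hlex
      obtain ⟨h1, h2, h3, h4, h5, h6, h7⟩ := ih t (i + 1) a b rest (by omega) hlex
      refine ⟨by omega, h2, h3, ?_, h5, h6, h7⟩
      intro k hk1 hk2
      rcases Nat.eq_or_lt_of_le hk1 with rfl | h
      · exact hw
      · exact h4 k h hk2
    · rw [if_neg hw] at hlex
      set l := t.getD i ' ' :: t.drop (i + 1) with hl
      set r := (l.takeWhile (fun d => !pvWsChar d)).length with hr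
      obtain ⟨ha, hb⟩ : a = i ∧ b = i + r := by
        have := hlex; injection this with h1 h2; injection h1 with ha hb; exact ⟨ha.symm, hb.symm⟩
      have hrest : rest = pvLex (l.drop r) (i + r) := by
        injection hlex with h1 h2; exact h2.symm
      have hlt : l = t.drop i := hdc.symm
      have hlen : l.length = t.length - i := by rw [hlt]; simp
      have hwf : pvWsChar (t.getD i ' ') = false := by
        cases hb' : pvWsChar (t.getD i ' ')
        · rfl
        · exact absurd hb' hw
      have hr1 : 0 < r := by
        rw [hr, hl, List.takeWhile_cons_of_pos (by rw [hwf]; rfl)]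
        simp
      have hrle : r ≤ l.length := by rw [hr]; exact (List.takeWhile_prefix _).length_le
      have hdropl : l.drop r = t.drop (i + r) := by
        rw [hlt, List.drop_drop]
      have hget : ∀ j, l.getD j ' ' = t.getD (i + j) ' ' := by
        intro j; rw [hlt, getD_drop]
      subst ha hb
      refine ⟨le_refl _, by omega, by omega, by omega, ?_, ?_, by rw [hrest, hdropl]⟩
      · intro k hk1 hk2
        have hj := takeWhile_pred (fun d => !pvWsChar d) l (k - a) (by omega)
        rw [hget] at hj
        have : a + (k - a) = k := by omega
        rw [this] at hj
        simpa using hj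
      · rcases takeWhile_maximal (fun d => !pvWsChar d) l with h | h
        · left; omega
        · right
          rw [← hr, hget] at h
          simpa using h

theorem lex_suffix : ∀ (pre : List (Nat × Nat)) (t : List Char) i (p : Nat × Nat) rest,
    pvLex (t.drop i) i = pre ++ p :: rest →
    i ≤ p.1 ∧ p.1 < p.2 ∧ p.2 ≤ t.length ∧
    (∀ k, p.1 ≤ k → k < p.2 → pvWsChar (t.getD k ' ') = false) ∧
    rest = pvLex (t.drop p.2) p.2 := by
  intro pre
  induction pre with
  | nil =>
    intro t i p rest hlex
    obtain ⟨h1, h2, h3, _, h5, _, h7⟩ := lex_cons (t.length - i) t i p.1 p.2 rest rfl (by simpa using hlex)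
    exact ⟨h1, h2, h3, h5, h7⟩
  | cons q pre' ih =>
    intro t i p rest hlex
    obtain ⟨h1, h2, h3, _, _, _, h7⟩ := lex_cons (t.length - i) t i q.1 q.2 (pre' ++ p :: rest) rfl (by simpa using hlex)
    obtain ⟨g1, g2, g3, g4, g5⟩ := ih t q.2 p rest h7.symm
    exact ⟨by omega, g2, g3, g4, g5⟩

-- the start of the head span bounds every later span's start
theorem lex_head_le : ∀ (tw : List (Nat × Nat)) (t : List Char) i a0 b0 rest0 (p : Nat × Nat) rest1,
    pvLex (t.drop i) i = (a0, b0) :: rest0 →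
    (a0, b0) :: rest0 = tw ++ p :: rest1 →
    a0 ≤ p.1 := by
  intro tw t i a0 b0 rest0 p rest1 hlex hsplit
  cases tw with
  | nil =>
    injection hsplit with h1 _
    rw [← h1]
  | cons x tw' =>
    injection hsplit with h1 h2
    obtain ⟨_, h2', _, _, _, _, h7⟩ := lex_cons (t.length - i) t i a0 b0 rest0 rfl hlex
    obtain ⟨g1, _, _, _, _⟩ := lex_suffix tw' t b0 p rest1 (by rw [← h7, h2]; rfl)
    omega

theorem filter_range'_token (p : Nat → Bool) : ∀ r i, 0 < r →
    (∀ j, j < r - 1 → p (i + j) = false) →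
    (List.range' i r).filter p = if p (i + r - 1) then [i + r - 1] else [] := by
  intro r
  induction r with
  | zero => intro i h0 hj; omega
  | succ r ih =>
    intro i h0 hj
    rcases Nat.eq_zero_or_pos r with rfl | hr
    · rw [List.range'_one]
      rcases hp : p i with _ | _ <;> simp [List.filter, hp]
    · have hpi : p i = false := by have := hj 0 (by omega); simpa using this
      have hrec := ih (i + 1) hr (fun j hj' => by
        have h1 := hj (j + 1) (by omega)
        have h2 : i + 1 + j = i + (j + 1) := by omega
        rw [h2]; exact h1)
      have harith : i + 1 + r - 1 = i + (r + 1) - 1 := by omega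
      rw [List.range'_succ]
      simp only [List.filter, hpi]
      rw [hrec, harith]

theorem bnds_spec : ∀ m (t : List Char) i, t.length - i = m →
    (List.range' i (t.length - i)).filter (pvIsEnd t) =
      match (pvLex (t.drop i) i).dropWhile (fun p => !pvIsBnd t p) with
      | [] => []
      | p :: _ => (p.2 - 1) :: (List.range' p.2 (t.length - p.2)).filter (pvIsEnd t) := by
  intro m
  induction m using Nat.strong_induction_on with
  | _ m ihm =>
    intro t i hm
    rcases Nat.eq_zero_or_pos m with rfl | hmpos
    · have hnil : t.drop i = [] := List.drop_eq_nil_of_le (by omega)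
      rw [hm]
      simp [hnil, pvLex, List.range']
    · have hi : i < t.length := by omega
      by_cases hw : pvWsChar (t.getD i ' ') = true
      · have hpe : pvIsEnd t i = false := by
          unfold pvIsEnd
          rw [ws_not_punct _ hw]
          simp
        have hrw : pvLex (t.drop i) i = pvLex (t.drop (i + 1)) (i + 1) := by
          rw [drop_cons t i hi, pvLex_cons, if_pos hw]
        have hsz : t.length - i = (t.length - (i + 1)) + 1 := by omega
        rw [hsz, List.range'_succ]
        simp only [List.filter, hpe]
        rw [hrw]
        exact ihm (t.length - (i + 1)) (by omega) t (i + 1) rfl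
      · -- token case
        have hlex : pvLex (t.drop i) i =
            (i, i + ((t.drop i).takeWhile (fun d => !pvWsChar d)).length) ::
              pvLex (t.drop (i + ((t.drop i).takeWhile (fun d => !pvWsChar d)).length))
                (i + ((t.drop i).takeWhile (fun d => !pvWsChar d)).length) := by
          conv_lhs => rw [drop_cons t i hi, pvLex_cons, if_neg hw]
          rw [← drop_cons t i hi, List.drop_drop]
        set r := ((t.drop i).takeWhile (fun d => !pvWsChar d)).length with hr
        set b := i + r with hb
        obtain ⟨_, hib, hble, _, hnws, hmax, hrest⟩ :=
          lex_cons (t.length - i) t i i b (pvLex (t.drop b) b) rfl hlex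
        -- split the range at b
        have hsplit : List.range' i (t.length - i) =
            List.range' i (b - i) ++ List.range' (i + (b - i)) (t.length - b) := by
          rw [List.range'_append_1]
          congr 1
          omega
        have htok : (List.range' i (b - i)).filter (pvIsEnd t) =
            if pvIsEnd t (i + (b - i) - 1) then [i + (b - i) - 1] else [] := by
          apply filter_range'_token (pvIsEnd t) (b - i) i (by omega)
          intro j hj
          have hnw : pvWsChar (t.getD (i + j + 1) ' ') = false := hnws (i + j + 1) (by omega) (by omega)
          have hne : (i + j == t.length - 1) = false := by
            simp only [beq_eq_false_iff_ne, ne_eq]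
            omega
          unfold pvIsEnd
          rw [hnw, hne]
          simp
        have hbeq : pvIsEnd t (i + (b - i) - 1) = pvIsBnd t (i, b) := by
          have h2 : (b - 1 == t.length - 1 || pvWsChar (t.getD (b - 1 + 1) ' ')) = true := by
            rcases hmax with h | h
            · simp only [Bool.or_eq_true, beq_iff_eq]
              left; omega
            · have hb1 : b - 1 + 1 = b := by omega
              rw [hb1, h]
              simp
          have harith : i + (b - i) - 1 = b - 1 := by omega
          rw [harith]
          unfold pvIsEnd pvIsBnd
          rw [h2]
          simp
        by_cases hbnd : pvIsBnd t (i, b) = true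
        · rw [hsplit, List.filter_append, htok, hbeq, if_pos hbnd, hlex]
          rw [List.dropWhile_cons_of_neg (by simp [hbnd])]
          simp only
          have : i + (b - i) - 1 = b - 1 := by omega
          rw [this]
          have : i + (b - i) = b := by omega
          rw [this]
          rfl
        · rw [hsplit, List.filter_append, htok, hbeq, if_neg hbnd, hlex]
          rw [List.dropWhile_cons_of_pos (by simp [Bool.eq_false_iff.mpr hbnd])]
          have : i + (b - i) = b := by omega
          rw [this]
          rw [← hrest]
          exact ihm (t.length - b) (by omega) t b rfl

-- strip of a ws-padded block whose core starts and ends with a non-space char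
theorem dropWhile_append_of_all {α : Type} (p : α → Bool) (u w : List α)
    (hu : ∀ c ∈ u, p c = true) : (u ++ w).dropWhile p = w.dropWhile p := by
  induction u with
  | nil => simp
  | cons c cs ih =>
    have hc : p c = true := hu c (by simp)
    simp only [List.cons_append, List.dropWhile_cons_of_pos hc]
    exact ih (fun d hd => hu d (by simp [hd]))

theorem strip_core3 (u m v : List Char)
    (hu : ∀ c ∈ u, PySem.Chars.isspace c = true)
    (hv : ∀ c ∈ v, PySem.Chars.isspace c = true)
    (hm1 : ∃ c, m.head? = some c ∧ PySem.Chars.isspace c = false)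
    (hm2 : ∃ c, m.getLast? = some c ∧ PySem.Chars.isspace c = false) :
    PySem.Chars.strip (u ++ m ++ v) = m := by
  obtain ⟨c1, hc1, hc1s⟩ := hm1
  obtain ⟨c2, hc2, hc2s⟩ := hm2
  obtain ⟨m1, rfl⟩ : ∃ m1, m = c1 :: m1 := by
    cases m with
    | nil => simp at hc1
    | cons x xs => simp at hc1; exact ⟨xs, by rw [hc1]⟩
  unfold PySem.Chars.strip PySem.Chars.lstrip PySem.Chars.rstrip
  rw [List.append_assoc, dropWhile_append_of_all _ u _ hu]
  rw [List.cons_append, List.dropWhile_cons_of_neg (by simp [hc1s])]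
  rw [← List.cons_append, List.reverse_append]
  rw [dropWhile_append_of_all _ v.reverse _ (fun c hc => hv c (by simpa using hc))]
  have hrev : ∃ w, (c1 :: m1).reverse = c2 :: w := by
    have : (c1 :: m1).reverse.head? = some c2 := by
      rw [List.head?_reverse]; exact hc2
    cases hre : (c1 :: m1).reverse with
    | nil => simp [hre] at this
    | cons x xs => rw [hre] at this; simp at this; exact ⟨xs, by rw [this]⟩
  obtain ⟨w, hw⟩ := hrev
  rw [hw, List.dropWhile_cons_of_neg (by simp [hc2s]), ← hw, List.reverse_reverse]

theorem strip_all (l : List Char) (h : ∀ c ∈ l, PySem.Chars.isspace c = true) :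
    PySem.Chars.strip l = [] := by
  unfold PySem.Chars.strip PySem.Chars.lstrip PySem.Chars.rstrip
  have : l.dropWhile PySem.Chars.isspace = [] := by
    rw [List.dropWhile_eq_nil_iff]
    intro x hx
    exact h x hx
  rw [this]
  simp

-- the two strip-to-slice bridges (need the domain hypothesis: strip's whitespace = ' \t\n\r')
theorem all_isspace_of_range (t : List Char) (hdom : ∀ c ∈ t, pvDomChar c = true) (s : Nat)
    (h : ∀ k, s ≤ k → k < t.length → pvWsChar (t.getD k ' ') = true) :
    ∀ c ∈ t.drop s, PySem.Chars.isspace c = true := by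
  intro c hc
  obtain ⟨j, hj, heq⟩ := List.mem_iff_getElem.mp hc
  have hjl : s + j < t.length := by
    simp [List.length_drop] at hj
    omega
  have hge : (t.drop s)[j]'hj = t[s + j]'hjl := by
    simp [List.getElem_drop]
  rw [← heq, hge, isspace_eq_ws _ (hdom _ (List.getElem_mem hjl))]
  have hk := h (s + j) (by omega) hjl
  rwa [List.getD_eq_getElem t ' ' hjl] at hk

theorem strip_slice (t : List Char) (hdom : ∀ c ∈ t, pvDomChar c = true) (s a e : Nat)
    (hsa : s ≤ a) (hae : a < e) (he : e ≤ t.length)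
    (hws : ∀ k, s ≤ k → k < a → pvWsChar (t.getD k ' ') = true)
    (hna : pvWsChar (t.getD a ' ') = false)
    (hne : pvWsChar (t.getD (e - 1) ' ') = false) :
    sStrip t s e = slc t a e := by
  unfold sStrip slc
  rw [PySem.List.slice_natCast, PySem.List.slice_natCast]
  have hdd : (t.drop s).drop (a - s) = t.drop a := by
    rw [List.drop_drop]
    congr 1
    omega
  have hdecomp : (t.drop s).take (e - s) = (t.drop s).take (a - s) ++ (t.drop a).take (e - a) := by
    have h1 : e - s = (a - s) + (e - a) := by omega
    rw [h1, List.take_add, hdd]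
  rw [hdecomp]
  have h3 : (t.drop s).take (a - s) ++ (t.drop a).take (e - a) =
      (t.drop s).take (a - s) ++ (t.drop a).take (e - a) ++ ([] : List Char) := by simp
  rw [h3]
  apply strip_core3
  · intro c hc
    obtain ⟨j, hj, heq⟩ := List.mem_iff_getElem.mp hc
    have hjb : j < a - s := by
      simp [List.length_take, List.length_drop] at hj
      omega
    have hjl : s + j < t.length := by omega
    have hge : ((t.drop s).take (a - s))[j]'hj = t[s + j]'hjl := by
      simp [List.getElem_take, List.getElem_drop]
    rw [← heq, hge, isspace_eq_ws _ (hdom _ (List.getElem_mem hjl))]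
    have hk := hws (s + j) (by omega) (by omega)
    rwa [List.getD_eq_getElem t ' ' hjl] at hk
  · intro c hc
    simp at hc
  · have hal : a < t.length := by omega
    refine ⟨t[a]'hal, ?_, ?_⟩
    · rw [List.head?_eq_getElem?, List.getElem?_take_of_lt (by omega), List.getElem?_drop]
      simp [List.getElem?_eq_getElem hal]
    · rw [isspace_eq_ws _ (hdom _ (List.getElem_mem hal))]
      rwa [List.getD_eq_getElem t ' ' hal] at hna
  · have hel : e - 1 < t.length := by omega
    have hlen : ((t.drop a).take (e - a)).length = e - a := by
      simp [List.length_take, List.length_drop]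
      omega
    refine ⟨t[e - 1]'hel, ?_, ?_⟩
    · rw [List.getLast?_eq_getElem?, hlen, List.getElem?_take_of_lt (by omega), List.getElem?_drop]
      have h4 : a + (e - a - 1) = e - 1 := by omega
      rw [h4]
      simp [List.getElem?_eq_getElem hel]
    · rw [isspace_eq_ws _ (hdom _ (List.getElem_mem hel))]
      rwa [List.getD_eq_getElem t ' ' hel] at hne

theorem strip_drop_eq (t : List Char) (hdom : ∀ c ∈ t, pvDomChar c = true) (s a e : Nat)
    (hsa : s ≤ a) (hae : a < e) (he : e ≤ t.length)
    (hws : ∀ k, s ≤ k → k < a → pvWsChar (t.getD k ' ') = true)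
    (hna : pvWsChar (t.getD a ' ') = false)
    (hne : pvWsChar (t.getD (e - 1) ' ') = false)
    (htail : ∀ k, e ≤ k → k < t.length → pvWsChar (t.getD k ' ') = true) :
    PySem.Chars.strip (t.drop s) = slc t a e := by
  have hdd1 : (t.drop s).drop (a - s) = t.drop a := by
    rw [List.drop_drop]
    congr 1
    omega
  have hdd2 : (t.drop a).drop (e - a) = t.drop e := by
    rw [List.drop_drop]
    congr 1
    omega
  have hdecomp : t.drop s = (t.drop s).take (a - s) ++ ((t.drop a).take (e - a) ++ t.drop e) := by
    conv_lhs => rw [← List.take_append_drop (a - s) (t.drop s)]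
    rw [hdd1]
    conv_lhs => rw [← List.take_append_drop (e - a) (t.drop a)]
    rw [hdd2]
  rw [hdecomp, ← List.append_assoc]
  unfold slc
  rw [PySem.List.slice_natCast]
  apply strip_core3
  · intro c hc
    obtain ⟨j, hj, heq⟩ := List.mem_iff_getElem.mp hc
    have hjb : j < a - s := by
      simp [List.length_take, List.length_drop] at hj
      omega
    have hjl : s + j < t.length := by omega
    have hge : ((t.drop s).take (a - s))[j]'hj = t[s + j]'hjl := by
      simp [List.getElem_take, List.getElem_drop]
    rw [← heq, hge, isspace_eq_ws _ (hdom _ (List.getElem_mem hjl))]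
    have hk := hws (s + j) (by omega) (by omega)
    rwa [List.getD_eq_getElem t ' ' hjl] at hk
  · exact all_isspace_of_range t hdom e htail
  · have hal : a < t.length := by omega
    refine ⟨t[a]'hal, ?_, ?_⟩
    · rw [List.head?_eq_getElem?, List.getElem?_take_of_lt (by omega), List.getElem?_drop]
      simp [List.getElem?_eq_getElem hal]
    · rw [isspace_eq_ws _ (hdom _ (List.getElem_mem hal))]
      rwa [List.getD_eq_getElem t ' ' hal] at hna
  · have hel : e - 1 < t.length := by omega
    have hlen : ((t.drop a).take (e - a)).length = e - a := by
      simp [List.length_take, List.length_drop]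
      omega
    refine ⟨t[e - 1]'hel, ?_, ?_⟩
    · rw [List.getLast?_eq_getElem?, hlen, List.getElem?_take_of_lt (by omega), List.getElem?_drop]
      have h4 : a + (e - a - 1) = e - 1 := by omega
      rw [h4]
      simp [List.getElem?_eq_getElem hel]
    · rw [isspace_eq_ws _ (hdom _ (List.getElem_mem hel))]
      rwa [List.getD_eq_getElem t ' ' hel] at hne

theorem slc_ne_nil (t : List Char) (a e : Nat) (hae : a < e) (he : e ≤ t.length) :
    slc t a e ≠ [] := by
  unfold slc
  rw [PySem.List.slice_natCast]
  intro h
  have := congrArg List.length h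
  simp at this
  omega

-- group-loop characterisations
theorem pvGroup_cons (t : List Char) (a b : Nat) (rest : List (Nat × Nat))
    (gs : Option Nat) (sents : List (List Char)) :
    pvGroup t ((a, b) :: rest) gs sents =
      if pvEndPunct (t.getD (b - 1) ' ') then
        (if (sents ++ [PySem.List.slice t (some ((gs.getD a : Nat) : Int)) (some ((b : Nat) : Int))]).length == 2 then
          (sents ++ [PySem.List.slice t (some ((gs.getD a : Nat) : Int)) (some ((b : Nat) : Int))], none)
        else pvGroup t rest none (sents ++ [PySem.List.slice t (some ((gs.getD a : Nat) : Int)) (some ((b : Nat) : Int))]))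
      else pvGroup t rest (some (gs.getD a)) sents := by
  rfl

theorem group_one' (t : List Char) : ∀ (spans : List (Nat × Nat)) g x,
    pvGroup t spans (some g) [x] =
      match spans.dropWhile (fun p => !pvIsBnd t p) with
      | [] => ([x], some g)
      | p :: _ => ([x, slc t g p.2], none) := by
  intro spans
  induction spans with
  | nil => intro g x; simp [pvGroup, List.dropWhile]
  | cons ab rest ih =>
    intro g x
    obtain ⟨a, b⟩ := ab
    by_cases hb : pvEndPunct (t.getD (b - 1) ' ') = true
    · have hb' : pvIsBnd t (a, b) = true := hb
      rw [List.dropWhile_cons_of_neg (by simp [hb'])]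
      rw [pvGroup_cons, if_pos hb]
      simp [slc]
    · have hb' : pvIsBnd t (a, b) = false := by
        cases hx : pvEndPunct (t.getD (b - 1) ' ')
        · exact hx
        · exact absurd hx hb
      rw [List.dropWhile_cons_of_pos (by simp [hb'])]
      rw [pvGroup_cons, if_neg hb]
      simp only [Option.getD_some]
      exact ih g x

theorem group_zero' (t : List Char) : ∀ (spans : List (Nat × Nat)) g,
    pvGroup t spans (some g) [] =
      match spans.dropWhile (fun p => !pvIsBnd t p) with
      | [] => ([], some g)
      | p :: rest => pvGroup t rest none [slc t g p.2] := by
  intro spans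
  induction spans with
  | nil => intro g; simp [pvGroup, List.dropWhile]
  | cons ab rest ih =>
    intro g
    obtain ⟨a, b⟩ := ab
    by_cases hb : pvEndPunct (t.getD (b - 1) ' ') = true
    · have hb' : pvIsBnd t (a, b) = true := hb
      rw [List.dropWhile_cons_of_neg (by simp [hb'])]
      rw [pvGroup_cons, if_pos hb]
      simp [slc]
    · have hb' : pvIsBnd t (a, b) = false := by
        cases hx : pvEndPunct (t.getD (b - 1) ' ')
        · exact hx
        · exact absurd hx hb
      rw [List.dropWhile_cons_of_pos (by simp [hb'])]
      rw [pvGroup_cons, if_neg hb]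
      simp only [Option.getD_some]
      exact ih g

theorem group_zero (t : List Char) (spans : List (Nat × Nat)) :
    pvGroup t spans none [] =
      match spans with
      | [] => ([], none)
      | (a, _) :: _ =>
        match spans.dropWhile (fun p => !pvIsBnd t p) with
        | [] => ([], some a)
        | p :: rest => pvGroup t rest none [slc t a p.2] := by
  cases spans with
  | nil => simp [pvGroup]
  | cons ab rest =>
    obtain ⟨a, b⟩ := ab
    by_cases hb : pvEndPunct (t.getD (b - 1) ' ') = true
    · have hb' : pvIsBnd t (a, b) = true := hb
      rw [List.dropWhile_cons_of_neg (by simp [hb'])]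
      rw [pvGroup_cons, if_pos hb]
      simp [slc]
    · have hb' : pvIsBnd t (a, b) = false := by
        cases hx : pvEndPunct (t.getD (b - 1) ' ')
        · exact hx
        · exact absurd hx hb
      rw [List.dropWhile_cons_of_pos (by simp [hb'])]
      rw [pvGroup_cons, if_neg hb]
      simp only [Option.getD_none]
      exact group_zero' t rest a

theorem group_one (t : List Char) (spans : List (Nat × Nat)) (x : List Char) :
    pvGroup t spans none [x] =
      match spans with
      | [] => ([x], none)
      | (a, _) :: _ =>
        match spans.dropWhile (fun p => !pvIsBnd t p) with
        | [] => ([x], some a)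
        | p :: _ => ([x, slc t a p.2], none) := by
  cases spans with
  | nil => simp [pvGroup]
  | cons ab rest =>
    obtain ⟨a, b⟩ := ab
    by_cases hb : pvEndPunct (t.getD (b - 1) ' ') = true
    · have hb' : pvIsBnd t (a, b) = true := hb
      rw [List.dropWhile_cons_of_neg (by simp [hb'])]
      rw [pvGroup_cons, if_pos hb]
      simp [slc]
    · have hb' : pvIsBnd t (a, b) = false := by
        cases hx : pvEndPunct (t.getD (b - 1) ' ')
        · exact hx
        · exact absurd hx hb
      rw [List.dropWhile_cons_of_pos (by simp [hb'])]
      rw [pvGroup_cons, if_neg hb]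
      simp only [Option.getD_none]
      exact group_one' t rest a x

theorem lex_last (t : List Char) (i a0 b0 : Nat) (rest0 : List (Nat × Nat))
    (hlex : pvLex (t.drop i) i = (a0, b0) :: rest0) :
    ∃ q : Nat × Nat, ((a0, b0) :: rest0).getLast? = some q ∧
      a0 ≤ q.1 ∧ q.1 < q.2 ∧ q.2 ≤ t.length ∧
      pvWsChar (t.getD (q.2 - 1) ' ') = false ∧
      (∀ k, q.2 ≤ k → k < t.length → pvWsChar (t.getD k ' ') = true) := by
  cases hrev : ((a0, b0) :: rest0).reverse with
  | nil => simp at hrev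
  | cons q w =>
    have hdec : (a0, b0) :: rest0 = w.reverse ++ [q] := by
      have h := congrArg List.reverse hrev
      simpa using h
    have hlast : ((a0, b0) :: rest0).getLast? = some q := by
      rw [hdec, List.getLast?_concat]
    obtain ⟨-, hq12, hqle, hqnws, hqrest⟩ := lex_suffix w.reverse t i q [] (by rw [hlex, hdec])
    have hhead : a0 ≤ q.1 := lex_head_le w.reverse t i a0 b0 rest0 q [] hlex (by rw [hdec])
    have htail := lex_nil (t.length - q.2) t q.2 rfl hqrest.symm
    exact ⟨q, hlast, hhead, hq12, hqle, hqnws (q.2 - 1) (by omega) (by omega), htail⟩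

-- ===== VERDICT (by name: the statement is the Claim_ definition above) =====
theorem get_first_two_sentences_spec : Claim_equal_get_first_two_sentences := by
  intro text hdom0
  unfold Spec_get_first_two_sentences get_first_two_sentences get_first_two_sentences_alt
  have hdom : ∀ c ∈ text.toList, pvDomChar c = true := by
    have h := hdom0
    unfold Dom_get_first_two_sentences pvDomStr at h
    simpa [List.all_eq_true] using h
  set t := text.toList with ht
  by_cases h0 : t.length = 0
  · simp [h0]
  · simp only [h0, beq_iff_eq, if_false]
    rw [loopA_zero t (List.range t.length) 0, group_zero]
    have hbnd0 : (List.range t.length).filter (pvIsEnd t) =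
        (match (pvLex (t.drop 0) 0).dropWhile (fun p => !pvIsBnd t p) with
        | [] => []
        | p :: _ => (p.2 - 1) :: (List.range' p.2 (t.length - p.2)).filter (pvIsEnd t)) := by
      rw [List.range_eq_range']
      have hb := bnds_spec (t.length - 0) t 0 rfl
      simpa using hb
    rcases hsp : pvLex t 0 with _ | ⟨⟨a0, b0⟩, rest0⟩
    · -- no tokens at all: text is all whitespace
      have hsp0 : pvLex (t.drop 0) 0 = [] := by rw [List.drop_zero]; exact hsp
      have hfil : (List.range t.length).filter (pvIsEnd t) = [] := by
        rw [hbnd0, hsp0]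
        rfl
      rw [hfil]
      have hallws : ∀ c ∈ t, PySem.Chars.isspace c = true := by
        have h := all_isspace_of_range t hdom 0 (lex_nil (t.length - 0) t 0 rfl hsp0)
        simpa using h
      have hstrip : PySem.Chars.strip t = [] := strip_all t hallws
      simp [hstrip, PySem.Chars.join, List.intercalate]
    · have hsp0 : pvLex (t.drop 0) 0 = (a0, b0) :: rest0 := by rw [List.drop_zero]; exact hsp
      obtain ⟨-, hab, hble0, hws0, hnws0, -, hrest0⟩ :=
        lex_cons (t.length - 0) t 0 a0 b0 rest0 rfl hsp0
      rcases hdw : ((a0, b0) :: rest0).dropWhile (fun p => !pvIsBnd t p) with _ | ⟨p, rest1⟩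
      · -- tokens but no boundary token
        have hfil : (List.range t.length).filter (pvIsEnd t) = [] := by
          rw [hbnd0, hsp0, hdw]
        rw [hfil]
        simp only [hdw]
        obtain ⟨q, hqlast, hqa, hq12, hqle, hqne, hqtail⟩ := lex_last t 0 a0 b0 rest0 hsp0
        have hstrip : PySem.Chars.strip t = slc t a0 q.2 := by
          have h := strip_drop_eq t hdom 0 a0 q.2 (by omega) (by omega) hqle
            (fun k _ hk => hws0 k (by omega) hk) (hnws0 a0 le_rfl hab) hqne hqtail
          rwa [List.drop_zero] at h
        have hnn : slc t a0 q.2 ≠ [] := slc_ne_nil t a0 q.2 (by omega) hqle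
        have hnn' : PySem.List.slice t (some ((a0 : Nat) : Int)) (some ((q.2 : Nat) : Int)) ≠ [] := hnn
        simp [hstrip, hnn', hqlast, slc, Nat.pos_of_ne_zero h0, PySem.Chars.join, List.intercalate]
      · -- at least one boundary token p
        have hsplit : (a0, b0) :: rest0 =
            ((a0, b0) :: rest0).takeWhile (fun p => !pvIsBnd t p) ++ p :: rest1 := by
          conv_lhs => rw [← List.takeWhile_append_dropWhile
            (p := fun p => !pvIsBnd t p) (l := (a0, b0) :: rest0)]
          rw [hdw]
        obtain ⟨-, hp12, hple, hpnws, hrest1⟩ :=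
          lex_suffix _ t 0 p rest1 (by rw [hsp0, hsplit])
        have ha0p : a0 ≤ p.1 := lex_head_le _ t 0 a0 b0 rest0 p rest1 hsp0 hsplit
        have hs1 : sStrip t 0 (p.2 - 1 + 1) = slc t a0 p.2 := by
          have e1 : p.2 - 1 + 1 = p.2 := by omega
          rw [e1]
          exact strip_slice t hdom 0 a0 p.2 (by omega) (by omega) hple
            (fun k _ hk => hws0 k (by omega) hk) (hnws0 a0 le_rfl hab)
            (hpnws (p.2 - 1) (by omega) (by omega))
        have hlex2 : pvLex (t.drop p.2) p.2 = rest1 := hrest1.symm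
        have hbfil2 := bnds_spec (t.length - p.2) t p.2 rfl
        rw [hlex2] at hbfil2
        simp only [hdw]
        rcases hdw2 : rest1.dropWhile (fun p => !pvIsBnd t p) with _ | ⟨q', rest3⟩
        · -- exactly one boundary
          rw [hdw2] at hbfil2
          have hbfil2' : (List.range' p.2 (t.length - p.2)).filter (pvIsEnd t) = [] := hbfil2
          have hfil : (List.range t.length).filter (pvIsEnd t) = [p.2 - 1] := by
            rw [hbnd0, hsp0, hdw]
            show (p.2 - 1) :: (List.range' p.2 (t.length - p.2)).filter (pvIsEnd t) = [p.2 - 1]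
            rw [hbfil2']
          rw [hfil]
          rcases rest1 with _ | ⟨⟨a2, b2⟩, rest2⟩
          · -- nothing after the boundary token
            have hwsrest : ∀ c ∈ t.drop p.2, PySem.Chars.isspace c = true :=
              all_isspace_of_range t hdom p.2 (lex_nil (t.length - p.2) t p.2 rfl hlex2)
            have hstrip2 : PySem.Chars.strip (t.drop (p.2 - 1 + 1)) = [] := by
              have e1 : p.2 - 1 + 1 = p.2 := by omega
              rw [e1]
              exact strip_all _ hwsrest
            have hstrip2' : PySem.Chars.strip
                (PySem.List.slice t (some (((p.2 - 1 : Nat) : Int) + 1)) none) = [] := by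
              have hc : ((p.2 - 1 : Nat) : Int) + 1 = ((p.2 - 1 + 1 : Nat) : Int) := by push_cast; ring
              rw [hc, PySem.List.slice_from_natCast]
              exact hstrip2
            by_cases hplen : p.2 - 1 + 1 < t.length
            · simp [pvGroup, hs1, hstrip2', hplen, PySem.Chars.join, List.intercalate]
            · simp [pvGroup, hs1, hplen, PySem.Chars.join, List.intercalate]
          · -- trailing tokens after the single boundary
            obtain ⟨hpa2, hab2, hble2, hws2, hnws2, -, hrest2⟩ :=
              lex_cons (t.length - p.2) t p.2 a2 b2 rest2 rfl hlex2
            obtain ⟨q, hqlast, hqa, hq12, hqle, hqne, hqtail⟩ := lex_last t p.2 a2 b2 rest2 hlex2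
            have hstrip2 : PySem.Chars.strip (t.drop (p.2 - 1 + 1)) = slc t a2 q.2 := by
              have e1 : p.2 - 1 + 1 = p.2 := by omega
              rw [e1]
              exact strip_drop_eq t hdom p.2 a2 q.2 (by omega) (by omega) hqle
                (fun k hk1 hk2 => hws2 k hk1 hk2) (hnws2 a2 le_rfl hab2) hqne hqtail
            have hnn2 : slc t a2 q.2 ≠ [] := slc_ne_nil t a2 q.2 (by omega) hqle
            have hplen : p.2 - 1 + 1 < t.length := by omega
            have hqlast2 : ((a0, b0) :: rest0).getLast? = some q := by
              rw [hsplit, List.getLast?_append]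
              have h1 : (p :: (a2, b2) :: rest2).getLast? = some q := by
                have h2 : p :: (a2, b2) :: rest2 = [p] ++ (a2, b2) :: rest2 := rfl
                rw [h2, List.getLast?_append, hqlast]
                rfl
              rw [h1]
              rfl
            have hstrip2' : PySem.Chars.strip
                (PySem.List.slice t (some (((p.2 - 1 : Nat) : Int) + 1)) none) = slc t a2 q.2 := by
              have hc : ((p.2 - 1 : Nat) : Int) + 1 = ((p.2 - 1 + 1 : Nat) : Int) := by push_cast; ring
              rw [hc, PySem.List.slice_from_natCast]
              exact hstrip2
            have hnn2u : PySem.List.slice t (some ((a2 : Nat) : Int)) (some ((q.2 : Nat) : Int)) ≠ [] := hnn2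
            rw [group_one]
            simp only [hdw2]
            simp [hs1, hstrip2', hnn2u, hplen, hqlast2, slc, PySem.Chars.join, List.intercalate]
        · -- two boundaries
          rw [hdw2] at hbfil2
          have hbfil2' : (List.range' p.2 (t.length - p.2)).filter (pvIsEnd t) =
              (q'.2 - 1) :: (List.range' q'.2 (t.length - q'.2)).filter (pvIsEnd t) := hbfil2
          have hfil : (List.range t.length).filter (pvIsEnd t) =
              (p.2 - 1) :: (q'.2 - 1) ::
                (List.range' q'.2 (t.length - q'.2)).filter (pvIsEnd t) := by
            rw [hbnd0, hsp0, hdw]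
            show (p.2 - 1) :: (List.range' p.2 (t.length - p.2)).filter (pvIsEnd t) = _
            rw [hbfil2']
          rw [hfil]
          rcases rest1 with _ | ⟨⟨a2, b2⟩, rest2⟩
          · simp at hdw2
          · obtain ⟨hpa2, hab2, hble2, hws2, hnws2, -, hrest2⟩ :=
              lex_cons (t.length - p.2) t p.2 a2 b2 rest2 rfl hlex2
            have hsplit2 : (a2, b2) :: rest2 =
                ((a2, b2) :: rest2).takeWhile (fun p => !pvIsBnd t p) ++ q' :: rest3 := by
              conv_lhs => rw [← List.takeWhile_append_dropWhile
                (p := fun p => !pvIsBnd t p) (l := (a2, b2) :: rest2)]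
              rw [hdw2]
            obtain ⟨-, hq12', hqle', hqnws', -⟩ :=
              lex_suffix _ t p.2 q' rest3 (by rw [hlex2, hsplit2])
            have ha2q : a2 ≤ q'.1 := lex_head_le _ t p.2 a2 b2 rest2 q' rest3 hlex2 hsplit2
            have hs2 : sStrip t (p.2 - 1 + 1) (q'.2 - 1 + 1) = slc t a2 q'.2 := by
              have e1 : p.2 - 1 + 1 = p.2 := by omega
              have e2 : q'.2 - 1 + 1 = q'.2 := by omega
              rw [e1, e2]
              exact strip_slice t hdom p.2 a2 q'.2 (by omega) (by omega) hqle'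
                (fun k hk1 hk2 => hws2 k hk1 hk2) (hnws2 a2 le_rfl hab2)
                (hqnws' (q'.2 - 1) (by omega) (by omega))
            rw [group_one]
            simp only [hdw2]
            simp [hs1, hs2, slc]
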